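-- pv_equiv track=rewrite | github.com/m33x/MaxBib | order_within.py | get_bibitems
-- ===== SOURCE A (Python) =====
-- from collections import OrderedDict
--
-- def get_bibitems(bib):
--     """Where does a bibentry start, where does it end?"""
--     result = OrderedDict()
--     item = []
--     entry_name = ''
--     for line in bib:
--         if line != '':
--             item.append(line)
--         if line.startswith('@'):
--             entry_name = line
--         if line.startswith('}'):
--             result[entry_name] = item
--             entry_name = ''
--             item = []
--     return result
-- ===== SOURCE B (Python) =====
-- from collections import OrderedDict
--
-- def get_bibitems(bib):
--     """Where does a bibentry start, where does it end?"""
--     # Phase 1: cut bib into segments, a segment ends after each line starting with '}'.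
--     segments = []
--     current = []
--     for line in bib:
--         current.append(line)
--         if line.startswith('}'):
--             segments.append(current)
--             current = []
--     # (an unterminated trailing segment is discarded)
--     # Phase 2: map each complete segment to (key, value).
--     result = OrderedDict()
--     for seg in segments:
--         key = next((l for l in reversed(seg) if l.startswith('@')), '')
--         result[key] = [l for l in seg if l != '']
--     return result
-- ===== Notes on version B (the rewrite author's own statement) =====
-- stated objective: alternative
-- what changed: Replaced A's single incremental accumulator scan (item/entry_name state mutated per line) with two phases: first cut the lines into '}'-terminated segments discarding the unterminated tail, then map each complete segment to its key (last '@' line, found by a reversed scan) and value (its non-empty lines).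
import Mathlib
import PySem

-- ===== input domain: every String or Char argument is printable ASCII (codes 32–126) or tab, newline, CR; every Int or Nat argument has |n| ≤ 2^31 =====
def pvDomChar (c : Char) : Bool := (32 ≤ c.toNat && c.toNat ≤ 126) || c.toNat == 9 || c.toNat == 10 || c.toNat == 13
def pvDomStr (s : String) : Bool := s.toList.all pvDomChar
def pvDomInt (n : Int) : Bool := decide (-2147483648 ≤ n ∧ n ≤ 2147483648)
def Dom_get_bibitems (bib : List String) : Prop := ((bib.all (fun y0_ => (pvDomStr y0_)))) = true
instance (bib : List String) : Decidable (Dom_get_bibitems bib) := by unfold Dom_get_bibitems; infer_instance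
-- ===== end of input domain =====

-- B re-decomposes A's single accumulator scan into two phases (cut into '}'-terminated
-- segments, then map each segment to its key/value); same values, objective: alternative.

-- ===== PORT A =====
-- one step of A's loop body over the state (result, item, entry_name)
def pvStepA (st : PySem.Dict String (List String) × List String × String) (line : String) :
    PySem.Dict String (List String) × List String × String :=
  let result := st.1
  let item := st.2.1
  let entry_name := st.2.2
  let item := if line ≠ "" then item ++ [line] else item
  let entry_name := if PySem.Str.startswith line "@" then line else entry_name
  if PySem.Str.startswith line "}" then (result.insert entry_name item, [], "")
  else (result, item, entry_name)

def get_bibitems (bib : List String) : List (String × List String) :=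
  (bib.foldl pvStepA (PySem.Dict.empty, [], "")).1.items

-- ===== PORT B =====
-- phase 1: one step of the segment-cutting loop over (segments, current)
def pvStepSeg (st : List (List String) × List String) (line : String) :
    List (List String) × List String :=
  let current := st.2 ++ [line]
  if PySem.Str.startswith line "}" then (st.1 ++ [current], [])
  else (st.1, current)

-- phase 2 helpers: key = last '@' line of the segment (default ''), value = non-empty lines
def pvKeyOf (seg : List String) : String :=
  ((seg.reverse.find? (fun l => PySem.Str.startswith l "@")).getD "")

def pvValOf (seg : List String) : List String :=
  seg.filter (fun l => l ≠ "")

def get_bibitems_alt (bib : List String) : List (String × List String) :=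
  let segments := (bib.foldl pvStepSeg ([], [])).1
  (segments.foldl (fun r seg => r.insert (pvKeyOf seg) (pvValOf seg)) PySem.Dict.empty).items

-- ===== PRECONDITION & SPEC =====
def Spec_get_bibitems (bib : List String) (out : List (String × List String)) : Prop := out = get_bibitems_alt bib
instance (bib : List String) (out : List (String × List String)) : Decidable (Spec_get_bibitems bib out) := by unfold Spec_get_bibitems; infer_instance

-- ===== CLAIM (what is proved, stated in full; the proofs are below) =====
def Claim_equal_get_bibitems : Prop := ∀ (bib : List String), Dom_get_bibitems bib → Spec_get_bibitems bib (get_bibitems bib)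

-- ===== LEMMAS AND PROOFS =====

lemma pvValOf_append (cur : List String) (line : String) :
    pvValOf (cur ++ [line]) = if line ≠ "" then pvValOf cur ++ [line] else pvValOf cur := by
  simp [pvValOf, List.filter_append]
  split_ifs with h <;> simp [h]

lemma pvKeyOf_append (cur : List String) (line : String) :
    pvKeyOf (cur ++ [line]) = if PySem.Str.startswith line "@" then line else pvKeyOf cur := by
  simp [pvKeyOf, List.find?]
  split_ifs with h <;> simp [h]

lemma pvSeg_acc (bib : List String) : ∀ (segs : List (List String)) (cur : List String),
    bib.foldl pvStepSeg (segs, cur) =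
      (segs ++ (bib.foldl pvStepSeg ([], cur)).1, (bib.foldl pvStepSeg ([], cur)).2) := by
  induction bib with
  | nil => intro segs cur; simp
  | cons line rest ih =>
    intro segs cur
    simp only [List.foldl_cons, pvStepSeg]
    split_ifs with h
    · simp only [List.nil_append]
      rw [ih (segs ++ [cur ++ [line]]) [], ih [cur ++ [line]] []]
      simp
    · exact ih segs (cur ++ [line])

lemma pv_main (bib : List String) :
    ∀ (res : PySem.Dict String (List String)) (item : List String) (entry : String)
      (cur : List String), item = pvValOf cur → entry = pvKeyOf cur →
    (bib.foldl pvStepA (res, item, entry)).1 =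
      ((bib.foldl pvStepSeg ([], cur)).1.foldl
        (fun r seg => r.insert (pvKeyOf seg) (pvValOf seg)) res) := by
  induction bib with
  | nil => intro res item entry cur hi he; simp
  | cons line rest ih =>
    intro res item entry cur hi he
    subst hi he
    simp only [List.foldl_cons, pvStepA, pvStepSeg]
    rw [← pvValOf_append cur line, ← pvKeyOf_append cur line]
    split_ifs with h
    · rw [ih (res.insert (pvKeyOf (cur ++ [line])) (pvValOf (cur ++ [line]))) [] "" [] rfl rfl]
      simp only [List.nil_append]
      rw [pvSeg_acc rest [cur ++ [line]] []]
      simp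
    · exact ih res (pvValOf (cur ++ [line])) (pvKeyOf (cur ++ [line])) (cur ++ [line]) rfl rfl

-- ===== VERDICT (by name: the statement is the Claim_ definition above) =====
theorem get_bibitems_spec : Claim_equal_get_bibitems := by
  intro bib _
  have h := pv_main bib PySem.Dict.empty [] "" [] rfl rfl
  simp only [Spec_get_bibitems, get_bibitems, get_bibitems_alt, h, pvValOf]
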